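-- pv_equiv track=rewrite | github.com/iamhge/coding_test | Graph/pro_여행경로.py | DFS
-- ===== SOURCE A (Python) =====
-- from collections import deque
--
-- def findNextTickets(now, tickets):
--     for ticket in tickets:
--         if ticket[0] == now:
--             yield ticket
--
-- def DFS(tickets):
--     visited = {tuple(ticket): 0 for ticket in tickets}
--     for ticket in tickets:
--         visited[tuple(ticket)] += 1
--
--     stack = deque([( ["ICN"], visited.copy())])
--     result = []
--
--     while stack:
--         route, remainTickets = stack.pop()
--         if len(route) == len(tickets) + 1:
--             result.append(route)
--         for nextTicket in findNextTickets(route[-1], tickets):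
--             if remainTickets[tuple(nextTicket)] > 0:
--                 tmp = route[:]
--                 tmp.append(nextTicket[1])
--                 tmpRT = remainTickets.copy()
--                 tmpRT[tuple(nextTicket)] -= 1
--                 stack.append((tmp, tmpRT))
--
--     return result
-- ===== SOURCE B (Python) =====
-- def DFS(tickets):
--     # Recursive backtracking with a shared mutable route and remaining-ticket
--     # counts; candidates are scanned in reverse ticket order so the output
--     # order matches the LIFO stack exploration of the original.
--     counts = {}
--     for t in tickets:
--         counts[tuple(t)] = counts.get(tuple(t), 0) + 1
--     n = len(tickets)
--     result = []
--     route = ["ICN"]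
--
--     def backtrack():
--         if len(route) == n + 1:
--             result.append(route[:])
--             return
--         for t in reversed(tickets):
--             key = tuple(t)
--             if t[0] == route[-1] and counts[key] > 0:
--                 counts[key] -= 1
--                 route.append(t[1])
--                 backtrack()
--                 route.pop()
--                 counts[key] += 1
--
--     backtrack()
--     return result
-- ===== Notes on version B (the rewrite author's own statement) =====
-- stated objective: alternative
-- what changed: A's explicit LIFO stack of (route, copied-dict) states is replaced by recursive backtracking over one shared remaining-ticket counter (decrement, recurse, restore), scanning candidate tickets in reverse order to reproduce the stack's output order, so the per-push dict copy and route copy disappear.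
import Mathlib
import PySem

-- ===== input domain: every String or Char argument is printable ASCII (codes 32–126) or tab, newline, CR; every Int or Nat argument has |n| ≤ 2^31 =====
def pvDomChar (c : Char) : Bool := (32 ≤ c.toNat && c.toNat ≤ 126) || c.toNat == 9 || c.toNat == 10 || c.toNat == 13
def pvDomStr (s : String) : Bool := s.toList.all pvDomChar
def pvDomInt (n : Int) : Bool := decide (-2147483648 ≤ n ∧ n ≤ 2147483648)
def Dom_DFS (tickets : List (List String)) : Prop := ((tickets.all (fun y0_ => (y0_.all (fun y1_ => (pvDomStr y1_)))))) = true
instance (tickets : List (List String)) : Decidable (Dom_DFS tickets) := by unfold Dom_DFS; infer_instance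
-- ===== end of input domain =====

-- B replaces A's stack of (route, copied dict) pairs by recursive backtracking over a
-- single remaining-ticket counter, scanning candidates in reverse ticket order so the
-- output order matches A's LIFO exploration (objective: alternative decomposition;
-- A's dict copy per pushed node disappears).

-- ticket[0], ticket[1], route[-1]: inside Pre_ every access Python performs is in range,
-- so the "" defaults below are never the value Python would have raised on.
def pvT0 (t : List String) : String := PySem.List.pyGetD t 0 ""
def pvT1 (t : List String) : String := PySem.List.pyGetD t 1 ""
def pvLast (route : List String) : String := PySem.List.pyGetD route (-1) ""

-- findNextTickets(now, tickets): the generator yields, in ticket order, the tickets with source == now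
def pvFindNext (now : String) (tickets : List (List String)) : List (List String) :=
  tickets.filter (fun t => pvT0 t == now)

-- measure helpers for termination of both ports (cited by decreasing_by)
def pvMu (d : PySem.Dict (List String) Int) : Nat :=
  ((PySem.Set.ofList d.keys).map (fun k => (d.getD k 0).toNat)).sum

def pvStackMu (n : Nat) (S : List (List String × PySem.Dict (List String) Int)) : Nat :=
  (S.map (fun e => (n + 1) ^ pvMu e.2)).sum

theorem pv_sum_map_sub {α : Type} (l : List α) (t : α) (f g : α → Nat)
    (hl : l.Nodup) (ht : t ∈ l) (h : ∀ x ∈ l, x ≠ t → g x = f x) (hft : g t + 1 = f t) :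
    (l.map g).sum + 1 = (l.map f).sum := by
  induction l with
  | nil => cases ht
  | cons a l ih =>
    rcases List.mem_cons.mp ht with rfl | hmem
    · have : l.map g = l.map f := List.map_congr_left (by
        intro x hx
        exact h x (List.mem_cons_of_mem _ hx) (fun hxa => (List.nodup_cons.mp hl).1 (hxa ▸ hx)))
      simp [this]; omega
    · have ha : g a = f a := h a (List.mem_cons_self) (fun haa => (List.nodup_cons.mp hl).1 (haa ▸ hmem))
      have := ih (List.nodup_cons.mp hl).2 hmem (fun x hx hxt => h x (List.mem_cons_of_mem _ hx) hxt)
      simp [ha]; omega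

theorem pv_contains_of_getD_pos (d : PySem.Dict (List String) Int) (t : List String)
    (h : 0 < d.getD t 0) : d.contains t = true := by
  rw [PySem.Dict.contains_eq_isSome_get?]
  rw [PySem.Dict.getD_eq_get?_getD] at h
  cases hg : d.get? t with
  | none => rw [hg] at h; simp at h
  | some v => simp

theorem pvMu_pos (d : PySem.Dict (List String) Int) (t : List String)
    (h : 0 < d.getD t 0) : 1 ≤ pvMu d := by
  have hc := pv_contains_of_getD_pos d t h
  have hk : t ∈ PySem.Set.ofList d.keys :=
    (PySem.Set.mem_ofList _ _).mpr ((PySem.Dict.contains_iff_mem_keys d t).mp hc)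
  have hmem : (d.getD t 0).toNat ∈ (PySem.Set.ofList d.keys).map (fun k => (d.getD k 0).toNat) :=
    List.mem_map_of_mem hk
  have := List.single_le_sum (l := (PySem.Set.ofList d.keys).map (fun k => (d.getD k 0).toNat))
    (fun x _ => Nat.zero_le x) _ hmem
  unfold pvMu; omega

theorem pvMu_insert (d : PySem.Dict (List String) Int) (t : List String)
    (h : 0 < d.getD t 0) : pvMu (d.insert t (d.getD t 0 - 1)) + 1 = pvMu d := by
  have hc := pv_contains_of_getD_pos d t h
  have hkeys : (d.insert t (d.getD t 0 - 1)).keys = d.keys :=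
    PySem.Dict.keys_insert_of_contains d _ hc
  unfold pvMu
  rw [hkeys]
  apply pv_sum_map_sub (t := t)
  · exact PySem.Set.nodup_ofList _
  · exact (PySem.Set.mem_ofList _ _).mpr ((PySem.Dict.contains_iff_mem_keys d t).mp hc)
  · intro x _ hxt
    rw [PySem.Dict.getD_insert, if_neg hxt]
  · rw [PySem.Dict.getD_insert, if_pos rfl]; omega

-- the push loop of A writes the (filtered, mapped) candidates onto the stack in reverse
theorem pv_push_eq {α β : Type} (L : List α) (g : α → Prop) [DecidablePred g] (c : α → β) :
    ∀ S : List β,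
      L.foldl (fun st t => if g t then c t :: st else st) S
        = ((L.filter (fun t => decide (g t))).map c).reverse ++ S := by
  induction L with
  | nil => intro S; simp
  | cons a L ih =>
    intro S
    by_cases hg : g a
    · simp [List.foldl_cons, hg, ih (c a :: S)]
    · simp [List.foldl_cons, hg, ih S]

theorem pvStackMu_append (n : Nat) (S1 S2 : List (List String × PySem.Dict (List String) Int)) :
    pvStackMu n (S1 ++ S2) = pvStackMu n S1 + pvStackMu n S2 := by
  simp [pvStackMu]

-- the strict decrease used by pvLoopA's termination
theorem pvStackMu_decr (tickets : List (List String)) (route : List String) (d : PySem.Dict (List String) Int)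
    (S : List (List String × PySem.Dict (List String) Int)) :
    pvStackMu tickets.length
        ((pvFindNext (pvLast route) tickets).foldl
          (fun st t => if 0 < d.getD t 0 then (route ++ [pvT1 t], d.insert t (d.getD t 0 - 1)) :: st else st) S)
      < pvStackMu tickets.length ((route, d) :: S) := by
  rw [pv_push_eq]
  rw [pvStackMu_append]
  have hcons : pvStackMu tickets.length ((route, d) :: S)
      = (tickets.length + 1) ^ pvMu d + pvStackMu tickets.length S := by
    simp [pvStackMu]
  rw [hcons]
  have hpos : 0 < (tickets.length + 1) ^ pvMu d := Nat.pow_pos (by omega)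
  generalize hC : (pvFindNext (pvLast route) tickets).filter (fun t => decide (0 < d.getD t 0)) = C
  rcases List.eq_nil_or_concat C with hnil | ⟨C', x, hCx⟩
  · subst hnil; simp [pvStackMu]
  · -- some candidate passed the 0 < getD filter, so pvMu d ≥ 1 and every child has measure pvMu d - 1
    have hx : x ∈ C := by rw [hCx]; simp
    have hfilt : ∀ y ∈ C, 0 < d.getD y 0 := by
      intro y hy
      rw [← hC] at hy
      have := List.of_mem_filter hy
      simpa using this
    have hxg : 0 < d.getD x 0 := hfilt x hx
    have hmu1 : 1 ≤ pvMu d := pvMu_pos d x hxg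
    have hlen : C.length ≤ tickets.length := by
      rw [← hC]
      calc ((pvFindNext (pvLast route) tickets).filter (fun t => decide (0 < d.getD t 0))).length
            ≤ (pvFindNext (pvLast route) tickets).length := List.length_filter_le _ _
        _ ≤ tickets.length := List.length_filter_le _ _
    have hmap : ∀ e ∈ (C.map (fun t => (route ++ [pvT1 t], d.insert t (d.getD t 0 - 1)))),
        (tickets.length + 1) ^ pvMu e.2 = (tickets.length + 1) ^ (pvMu d - 1) := by
      intro e he
      rcases List.mem_map.mp he with ⟨t, htC, rfl⟩
      have htg : 0 < d.getD t 0 := hfilt t htC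
      have := pvMu_insert d t htg
      have : pvMu (d.insert t (d.getD t 0 - 1)) = pvMu d - 1 := by omega
      simp [this]
    have hsum : pvStackMu tickets.length
        ((C.map (fun t => (route ++ [pvT1 t], d.insert t (d.getD t 0 - 1)))).reverse)
        = C.length * (tickets.length + 1) ^ (pvMu d - 1) := by
      unfold pvStackMu
      rw [List.map_reverse, List.sum_reverse, List.map_map]
      rw [List.map_congr_left (by intro t ht; exact hmap _ (List.mem_map_of_mem ht))]
      simp [List.map_const']
    rw [hsum]
    have hlt : C.length * (tickets.length + 1) ^ (pvMu d - 1)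
        < (tickets.length + 1) ^ pvMu d := by
      calc C.length * (tickets.length + 1) ^ (pvMu d - 1)
          ≤ tickets.length * (tickets.length + 1) ^ (pvMu d - 1) :=
            Nat.mul_le_mul_right _ hlen
        _ < (tickets.length + 1) * (tickets.length + 1) ^ (pvMu d - 1) :=
            (Nat.mul_lt_mul_right (Nat.pow_pos (by omega))).mpr (by omega)
        _ = (tickets.length + 1) ^ (pvMu d - 1 + 1) := by rw [pow_succ, mul_comm]
        _ = (tickets.length + 1) ^ pvMu d := by congr 1; omega
    omega

-- ===== PORT A =====
-- the while-stack loop of A; the deque is the list with its top at the head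
-- (python appends/pops on the right; pushing children in ticket order = this foldl's conses)
def pvLoopA (tickets : List (List String)) :
    List (List String × PySem.Dict (List String) Int) → List (List String)
  | [] => []
  | (route, d) :: S =>
    (if route.length = tickets.length + 1 then [route] else []) ++
      pvLoopA tickets
        ((pvFindNext (pvLast route) tickets).foldl
          (fun st t => if 0 < d.getD t 0 then (route ++ [pvT1 t], d.insert t (d.getD t 0 - 1)) :: st else st) S)
termination_by S => pvStackMu tickets.length S
decreasing_by
  exact pvStackMu_decr tickets route d S

def DFS (tickets : List (List String)) : List (List String) :=
  -- visited = {tuple(t): 0 for t in tickets}; then visited[tuple(t)] += 1 for each t;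
  -- the stack starts as [(["ICN"], visited.copy())]
  pvLoopA tickets
    [(["ICN"],
      tickets.foldl (fun d t => d.modify t 0 (· + 1))
        (tickets.foldl (fun d t => d.insert t (0 : Int)) PySem.Dict.empty))]

-- ===== PORT B =====
-- backtrack(): base case emits the full route; otherwise pvGo scans the tickets in
-- reverse order and, for each usable ticket, recurses with the decremented counter and
-- extended route (functional backtracking: passed down instead of mutated/restored)
mutual
def pvBack (tickets : List (List String)) (route : List String)
    (cnt : PySem.Dict (List String) Int) : List (List String) :=
  if route.length = tickets.length + 1 then [route]
  else pvGo tickets route cnt tickets.reverse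
termination_by (pvMu cnt, tickets.length + 1)
decreasing_by
  simp only [List.length_reverse]
  exact Prod.Lex.right _ (by omega)

def pvGo (tickets : List (List String)) (route : List String)
    (cnt : PySem.Dict (List String) Int) :
    List (List String) → List (List String)
  | [] => []
  | t :: rem =>
    (if pvT0 t = pvLast route ∧ 0 < cnt.getD t 0 then
        pvBack tickets (route ++ [pvT1 t]) (cnt.insert t (cnt.getD t 0 - 1))
      else []) ++ pvGo tickets route cnt rem
termination_by rem => (pvMu cnt, rem.length)
decreasing_by
  · rename_i h
    exact Prod.Lex.left _ _ (by have := pvMu_insert cnt t h.2; omega)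
  · exact Prod.Lex.right _ (by simp)
end

def DFS_alt (tickets : List (List String)) : List (List String) :=
  -- counts[tuple(t)] = counts.get(tuple(t), 0) + 1 over the tickets, then backtrack from ["ICN"]
  pvBack tickets ["ICN"]
    (tickets.foldl (fun d t => d.insert t (d.getD t 0 + 1)) PySem.Dict.empty)

-- ===== PRECONDITION & SPEC =====
-- pvReach: the airports reachable from "ICN" along the edges t[0] → t[1] of the tickets
-- with at least two entries; tickets.length passes of the one-step closure reach the fixpoint.
def pvStep (tickets : List (List String)) (S : List String) : List String :=
  tickets.foldl
    (fun acc t => if 2 ≤ t.length ∧ pvT0 t ∈ acc then PySem.Set.add acc (pvT1 t) else acc) S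

def pvReach (tickets : List (List String)) : List String :=
  (List.range tickets.length).foldl (fun S _ => pvStep tickets S) ["ICN"]

-- Pre_ excludes exactly the inputs on which the Python A raises IndexError: a ticket that is
-- the empty list (its ticket[0] is read on the very first pass of findNextTickets), or a
-- 1-element ticket whose airport is reachable from "ICN" (the search then selects it and
-- reads its missing ticket[1]); on every other input A returns normally.  B raises on the
-- same inputs, so nothing A returns on is excluded.
def Pre_DFS (tickets : List (List String)) : Prop :=
  ∀ t ∈ tickets, t ≠ [] ∧ (t.length = 1 → pvT0 t ∉ pvReach tickets)
instance (tickets : List (List String)) : Decidable (Pre_DFS tickets) := by unfold Pre_DFS; infer_instance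

def pvWitness_DFS : List (List String) := [["ICN", "A"], ["A", "ICN"]]

def Spec_DFS (tickets : List (List String)) (out : List (List String)) : Prop := out = DFS_alt tickets
instance (tickets : List (List String)) (out : List (List String)) : Decidable (Spec_DFS tickets out) := by unfold Spec_DFS; infer_instance

-- ===== CLAIM (what is proved, stated in full; the proofs are below) =====
def Claim_equal_DFS : Prop := ∀ (tickets : List (List String)), Dom_DFS tickets → Pre_DFS tickets → Spec_DFS tickets (DFS tickets)

-- ===== LEMMAS AND PROOFS =====

-- A's stack entries are independent of one another: the loop distributes over ++
theorem pvLoopA_append (tickets : List (List String)) :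
    ∀ (m : Nat) (S1 : List (List String × PySem.Dict (List String) Int)),
      pvStackMu tickets.length S1 < m →
      ∀ S2, pvLoopA tickets (S1 ++ S2) = pvLoopA tickets S1 ++ pvLoopA tickets S2 := by
  intro m
  induction m with
  | zero => intro S1 h; omega
  | succ m ih =>
    intro S1 h S2
    match S1 with
    | [] => simp [pvLoopA]
    | (route, d) :: S1' =>
      have hlt : pvStackMu tickets.length
          (((pvFindNext (pvLast route) tickets).filter (fun t => decide (0 < d.getD t 0))).map
              (fun t => (route ++ [pvT1 t], d.insert t (d.getD t 0 - 1)))).reverse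
            + pvStackMu tickets.length S1' < m := by
        have hd := pvStackMu_decr tickets route d S1'
        rw [pv_push_eq, pvStackMu_append] at hd
        omega
      rw [List.cons_append, pvLoopA, pvLoopA, pv_push_eq, pv_push_eq, ← List.append_assoc,
        ih _ (by rw [pvStackMu_append]; exact hlt) S2, List.append_assoc]

theorem pvLoopA_flat (tickets : List (List String))
    (l : List (List String × PySem.Dict (List String) Int)) :
    pvLoopA tickets l = l.flatMap (fun e => pvLoopA tickets [e]) := by
  induction l with
  | nil => rw [pvLoopA]; rfl
  | cons e l ih =>
    have : e :: l = [e] ++ l := rfl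
    rw [this, pvLoopA_append tickets (pvStackMu tickets.length [e] + 1) [e] (by omega) l, ih]
    rfl

theorem pvGo_eq (tickets : List (List String)) (route : List String)
    (cnt : PySem.Dict (List String) Int) (L : List (List String)) :
    pvGo tickets route cnt L
      = L.flatMap (fun t =>
          if pvT0 t = pvLast route ∧ 0 < cnt.getD t 0 then
            pvBack tickets (route ++ [pvT1 t]) (cnt.insert t (cnt.getD t 0 - 1))
          else []) := by
  induction L with
  | nil => rw [pvGo]; rfl
  | cons t rem ih => rw [pvGo, ih]; simp

theorem pv_flatMap_if {α β : Type} (l : List α) (p : α → Prop) [DecidablePred p]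
    (f : α → List β) :
    l.flatMap (fun t => if p t then f t else [])
      = (l.filter (fun t => decide (p t))).flatMap f := by
  induction l with
  | nil => rfl
  | cons a l ih =>
    by_cases h : p a
    · simp [h, ih]
    · simp [h, ih]

-- core: one stack entry of A explores exactly like B's backtracking, under the
-- invariant that the remaining counts can fill the route to length |tickets| + 1
theorem pv_main (tickets : List (List String)) :
    ∀ (m : Nat) (route : List String) (d : PySem.Dict (List String) Int),
      pvMu d < m →
      route.length + pvMu d ≤ tickets.length + 1 →
      pvLoopA tickets [(route, d)] = pvBack tickets route d := by
  intro m
  induction m with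
  | zero => intro route d h; omega
  | succ m ih =>
    intro route d hm hinv
    rw [pvLoopA, pvBack, pv_push_eq]
    simp only [List.append_nil]
    rw [pvLoopA_flat, pvGo_eq, pv_flatMap_if]
    by_cases hfull : route.length = tickets.length + 1
    · -- the route is complete: all counts are 0, so no candidate survives the > 0 test
      have hmu0 : pvMu d = 0 := by omega
      have hC : (pvFindNext (pvLast route) tickets).filter
          (fun t => decide (0 < d.getD t 0)) = [] := by
        rw [List.filter_eq_nil_iff]
        intro t _ hdec
        have ht : 0 < d.getD t 0 := of_decide_eq_true hdec
        have := pvMu_pos d t ht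
        omega
      simp [hfull, hC]
    · -- the route is incomplete: both sides explore the same candidates in the same order
      have hC : (pvFindNext (pvLast route) tickets).filter (fun t => decide (0 < d.getD t 0))
          = tickets.filter (fun t => decide (pvT0 t = pvLast route ∧ 0 < d.getD t 0)) := by
        unfold pvFindNext
        rw [List.filter_filter]
        apply List.filter_congr
        intro t _
        simp [Bool.beq_eq_decide_eq, Bool.and_comm]
      rw [hC]
      simp only [if_neg hfull]
      rw [List.filter_reverse, ← List.map_reverse, List.flatMap_map]
      apply List.flatMap_congr
      intro t hmem
      have ht : 0 < d.getD t 0 := by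
        have := List.of_mem_filter (List.mem_reverse.mp hmem)
        exact (of_decide_eq_true this).2
      have hμ := pvMu_insert d t ht
      have h1 := pvMu_pos d t ht
      exact ih (route ++ [pvT1 t]) (d.insert t (d.getD t 0 - 1)) (by omega) (by simp; omega)

-- A's two initialization passes build exactly B's one-pass counter
theorem pv_init_dicts (tickets : List (List String)) :
    tickets.foldl (fun d t => d.modify t 0 (· + 1))
        (tickets.foldl (fun d t => d.insert t (0 : Int)) PySem.Dict.empty)
      = PySem.Dict.counter tickets := by
  apply PySem.Dict.ext
  have hkeys0 : (tickets.foldl (fun d t => d.insert t (0 : Int)) PySem.Dict.empty).keys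
      = PySem.Set.ofList tickets := by
    rw [show (fun (d : PySem.Dict (List String) Int) (t : List String) => d.insert t (0 : Int))
        = fun d t => d.insert t ((fun (_ : PySem.Dict (List String) Int) (_ : List String) =>
          (0 : Int)) d t) from rfl, PySem.Dict.keys_foldl_insert]
    simp [PySem.Dict.keys_empty, PySem.Set.update_nil_left]
  have hkeysA : (tickets.foldl (fun d t => d.modify t 0 (· + 1))
      (tickets.foldl (fun d t => d.insert t (0 : Int)) PySem.Dict.empty)).keys
      = PySem.Set.ofList tickets := by
    rw [show (fun (d : PySem.Dict (List String) Int) (t : List String) => d.modify t 0 (· + 1))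
        = fun d t => d.modify t 0 ((fun (_ : PySem.Dict (List String) Int) (_ : List String)
          (x : Int) => x + 1) d t) from rfl, PySem.Dict.keys_foldl_modify, hkeys0]
    rw [PySem.Set.update_eq_append_filter]
    have : (PySem.Set.ofList tickets).filter
        (fun y => !(PySem.Set.ofList tickets).contains y) = [] := by
      rw [List.filter_eq_nil_iff]
      intro a ha
      simp [PySem.Set.contains_eq_listContains] at *
      exact ha
    rw [this, List.append_nil]
  have hget0 : ∀ k, (tickets.foldl (fun d t => d.insert t (0 : Int))
      PySem.Dict.empty).getD k 0 = 0 := by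
    suffices h : ∀ (l : List (List String)) (d : PySem.Dict (List String) Int),
        (∀ k, d.getD k 0 = 0) → ∀ k, (l.foldl (fun d t => d.insert t (0 : Int)) d).getD k 0 = 0 by
      exact h tickets PySem.Dict.empty (by simp)
    intro l
    induction l with
    | nil => intro d h k; exact h k
    | cons a l ih =>
      intro d h k
      refine ih _ (fun k' => ?_) k
      rw [PySem.Dict.getD_insert]
      split <;> simp [h]
  have hgetA : ∀ k, (tickets.foldl (fun d t => d.modify t 0 (· + 1))
      (tickets.foldl (fun d t => d.insert t (0 : Int)) PySem.Dict.empty)).getD k 0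
      = (tickets.count k : Int) := by
    intro k
    rw [PySem.Dict.getD_foldl_modify_add_one, hget0]
    ring
  rw [PySem.Dict.items_eq_map_keys _ (by rw [hkeysA]; exact PySem.Set.nodup_ofList _) 0,
    PySem.Dict.items_counter, hkeysA]
  apply List.map_congr_left
  intro k _
  simp [hgetA k]

theorem pvMu_counter (tickets : List (List String)) :
    pvMu (PySem.Dict.counter tickets) = tickets.length := by
  unfold pvMu
  rw [PySem.Dict.keys_counter, PySem.Set.ofList_ofList]
  have hmap : (PySem.Set.ofList tickets).map (fun k => ((PySem.Dict.counter tickets).getD k 0).toNat)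
      = (PySem.Set.ofList tickets).map (fun k => tickets.count k) := by
    apply List.map_congr_left
    intro k _
    rw [PySem.Dict.getD_counter]
    simp
  rw [hmap]
  have hperm : (PySem.Set.ofList tickets).Perm tickets.dedup :=
    (List.perm_ext_iff_of_nodup (PySem.Set.nodup_ofList _) tickets.nodup_dedup).mpr
      (by intro a; rw [PySem.Set.mem_ofList, List.mem_dedup])
  rw [List.Perm.sum_eq (hperm.map _)]
  have hcnt : (tickets.dedup.map (fun k => List.count k tickets)).sum
      = (tickets.dedup.map (fun k => @List.count (List String) instBEqOfDecidableEq k tickets)).sum := by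
    congr 1
    apply List.map_congr_left
    intro k _
    unfold List.count
    apply List.countP_congr
    intro x _
    simp
  rw [hcnt]
  exact List.sum_map_count_dedup_eq_length tickets

-- ===== VERDICT (by name: the statement is the Claim_ definition above) =====
theorem DFS_spec : Claim_equal_DFS := by
  intro tickets _ _
  unfold Spec_DFS DFS DFS_alt
  rw [PySem.Dict.foldl_insert_getD_add_one_eq_counter, pv_init_dicts]
  exact pv_main tickets (pvMu (PySem.Dict.counter tickets) + 1) _ _ (by omega)
    (by simp [pvMu_counter]; omega)
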